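-- pv_equiv track=rewrite | github.com/churrasquita/progra-verano | rallymobil.py | duracion_ruta
-- ===== SOURCE A (Python) =====
-- def duracion_ruta(ruta):
--     totalDias = 0
--     for letra in str(ruta):
--         if letra == 'R':
--             totalDias += 1
--         elif letra == 'M':
--             totalDias += 3
--         elif letra == 'L':
--             totalDias += 5
--     return totalDias
-- ===== SOURCE B (Python) =====
-- def duracion_ruta(ruta):
--     dias = {'R': 1, 'M': 3, 'L': 5}
--
--     def go(seg):
--         if not seg:
--             return 0
--         if len(seg) == 1:
--             return dias.get(seg[0], 0)
--         mid = len(seg) // 2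
--         return go(seg[:mid]) + go(seg[mid:])
--
--     return go(str(ruta))
-- ===== Notes on version B (the rewrite author's own statement) =====
-- stated objective: alternative
-- what changed: Replaces the left-to-right branching accumulator loop by a divide-and-conquer recursion that splits the string in halves and looks each single character up in a weight table, summing the two halves.
import Mathlib
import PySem

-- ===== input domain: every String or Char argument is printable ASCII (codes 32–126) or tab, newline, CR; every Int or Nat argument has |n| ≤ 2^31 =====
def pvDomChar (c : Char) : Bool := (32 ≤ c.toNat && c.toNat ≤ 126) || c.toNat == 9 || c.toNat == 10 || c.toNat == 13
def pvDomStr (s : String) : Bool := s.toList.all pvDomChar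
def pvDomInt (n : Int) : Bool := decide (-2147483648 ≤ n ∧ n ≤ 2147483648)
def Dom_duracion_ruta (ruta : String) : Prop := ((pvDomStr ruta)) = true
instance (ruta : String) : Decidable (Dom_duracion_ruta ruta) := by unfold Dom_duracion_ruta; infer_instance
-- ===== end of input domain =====

-- B replaces A's branching accumulator loop by a divide-and-conquer recursion over string halves
-- with a weight table (alternative decomposition, same cost).

-- ===== PORT A =====
def duracion_ruta (ruta : String) : Int :=
  ruta.toList.foldl (fun totalDias letra =>
    if letra = 'R' then totalDias + 1
    else if letra = 'M' then totalDias + 3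
    else if letra = 'L' then totalDias + 5
    else totalDias) 0

-- ===== PORT B =====
-- helper go of Source B; seg[0] is written via head? (exact: taken only in the len == 1 branch,
-- where Python's seg[0] is the head); seg[:mid]/seg[mid:] with 0 ≤ mid ≤ len are take/drop.
def duracion_ruta_go (dias : PySem.Dict Char Int) (seg : List Char) : Int :=
  if seg.isEmpty then 0
  else if seg.length = 1 then
    dias.getD (seg.head?.getD ' ') 0
  else
    let mid := seg.length / 2
    duracion_ruta_go dias (seg.take mid) + duracion_ruta_go dias (seg.drop mid)
termination_by seg.length
decreasing_by
  · rcases seg with _ | ⟨a, _ | ⟨b, t⟩⟩ <;> simp_all <;> omega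
  · rcases seg with _ | ⟨a, _ | ⟨b, t⟩⟩ <;> simp_all <;> omega

def duracion_ruta_alt (ruta : String) : Int :=
  let dias : PySem.Dict Char Int := PySem.Dict.ofList [('R', 1), ('M', 3), ('L', 5)]
  duracion_ruta_go dias ruta.toList

-- ===== PRECONDITION & SPEC =====
def Spec_duracion_ruta (ruta : String) (out : Int) : Prop := out = duracion_ruta_alt ruta
instance (ruta : String) (out : Int) : Decidable (Spec_duracion_ruta ruta out) := by unfold Spec_duracion_ruta; infer_instance

-- ===== CLAIM (what is proved, stated in full; the proofs are below) =====
def Claim_equal_duracion_ruta : Prop := ∀ (ruta : String), Dom_duracion_ruta ruta → Spec_duracion_ruta ruta (duracion_ruta ruta)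

-- ===== LEMMAS AND PROOFS =====

-- per-character weight both programs agree on
def pvW (c : Char) : Int :=
  if c = 'R' then 1 else if c = 'M' then 3 else if c = 'L' then 5 else 0

theorem pvDias_getD (c : Char) :
    (PySem.Dict.ofList [('R', (1:Int)), ('M', 3), ('L', 5)]).getD c 0 = pvW c := by
  by_cases h1 : c = 'R'
  · subst h1; decide
  by_cases h2 : c = 'M'
  · subst h2; decide
  by_cases h3 : c = 'L'
  · subst h3; decide
  have e1 : ('R' == c) = false := by simp [Ne.symm h1]
  have e2 : ('M' == c) = false := by simp [Ne.symm h2]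
  have e3 : ('L' == c) = false := by simp [Ne.symm h3]
  simp [PySem.Dict.ofList, PySem.Dict.getD, PySem.Dict.get?, PySem.Dict.update,
    PySem.Dict.insert, PySem.Dict.empty, List.find?, e1, e2, e3, pvW, h1, h2, h3]

theorem pvGo_eq_sum (seg : List Char) :
    duracion_ruta_go (PySem.Dict.ofList [('R', (1:Int)), ('M', 3), ('L', 5)]) seg
      = (seg.map pvW).sum := by
  induction seg using duracion_ruta_go.induct with
  | case1 seg h =>
    rw [duracion_ruta_go]
    simp_all
  | case2 seg h h1 =>
    rw [duracion_ruta_go]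
    rcases seg with _ | ⟨a, t⟩
    · simp_all
    · have ht : t = [] := by simpa using h1
      subst ht
      simp [h1, pvDias_getD]
  | case3 seg h h1 mid ih1 ih2 =>
    rw [duracion_ruta_go]
    simp only [h, h1, Bool.false_eq_true, ite_false]
    rw [ih1, ih2]
    rw [← List.sum_append, ← List.map_append, List.take_append_drop]

theorem pvFoldl_eq_sum (seg : List Char) (a : Int) :
    seg.foldl (fun totalDias letra =>
      if letra = 'R' then totalDias + 1
      else if letra = 'M' then totalDias + 3
      else if letra = 'L' then totalDias + 5
      else totalDias) a = a + (seg.map pvW).sum := by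
  induction seg generalizing a with
  | nil => simp
  | cons x xs ih =>
    simp only [List.foldl_cons, ih, List.map_cons, List.sum_cons, pvW]
    split_ifs <;> ring

-- ===== VERDICT (by name: the statement is the Claim_ definition above) =====
theorem duracion_ruta_spec : Claim_equal_duracion_ruta := by
  intro ruta _
  unfold Spec_duracion_ruta duracion_ruta duracion_ruta_alt
  rw [pvFoldl_eq_sum, pvGo_eq_sum]
  ring
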